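-- pv_equiv track=rewrite | github.com/kyeryoong/online-judge | Two Pointer/P12987_숫자 게임.py | solution
-- ===== SOURCE A (Python) =====
-- def solution(A, B):
--     # 숫자를 오름차순으로 정렬
--     A.sort()
--     B.sort()
--
--     # B팀이 얻는 승점
--     answer = 0
--
--     length = len(A)
--
--     # [Key Point] 투 포인터 사용
--     i = 0
--     j = 0
--
--     while i < length and j < length:
--         # B팀의 숫자가 A팀의 숫자보다 큰 경우
--         if A[i] < B[j]:
--             i = i + 1
--             j = j + 1
--
--             # 승점 추가
--             answer = answer + 1
--
--         # A팀의 숫자가 B팀의 숫자보다 큰 경우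
--         else:
--             j = j + 1
--
--     return answer
-- ===== SOURCE B (Python) =====
-- def solution(A, B):
--     # Sort in place (keeps the original's argument-mutation side effect).
--     A.sort()
--     B.sort()
--
--     # The game is played against team A's n numbers, so only the n smallest
--     # B numbers are ever in play.
--     n = len(A)
--     bs = B[:n]
--
--     # Hall-type deficiency formula instead of matching: encode every B-team
--     # number as an even key 2*v and every A-team number as an odd key 2*v+1,
--     # so ascending key order puts a tied B number before the equal A number
--     # it cannot beat.  Scanning the merged keys, `diff` is (#B numbers seen)
--     # minus (#strictly smaller A numbers seen); its maximum prefix value is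
--     # exactly the number of B numbers in play that cannot be assigned a
--     # smaller A number, so the score is the number in play minus that maximum.
--     events = sorted([2 * v for v in bs] + [2 * v + 1 for v in A])
--     diff = 0
--     worst = 0
--     for k in events:
--         diff += 1 if k % 2 == 0 else -1
--         if diff > worst:
--             worst = diff
--     return len(bs) - worst
-- ===== Notes on version B (the rewrite author's own statement) =====
-- stated objective: alternative
-- what changed: Drops the greedy two-pointer matching entirely: B merges the numbers in play into one even/odd-key-encoded sorted stream and in one scan computes the maximum prefix surplus of B numbers over strictly smaller A numbers (a Hall-type deficiency count); the answer is the number of B numbers in play minus that maximum, with no pointers and no pairing performed.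
import Mathlib
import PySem

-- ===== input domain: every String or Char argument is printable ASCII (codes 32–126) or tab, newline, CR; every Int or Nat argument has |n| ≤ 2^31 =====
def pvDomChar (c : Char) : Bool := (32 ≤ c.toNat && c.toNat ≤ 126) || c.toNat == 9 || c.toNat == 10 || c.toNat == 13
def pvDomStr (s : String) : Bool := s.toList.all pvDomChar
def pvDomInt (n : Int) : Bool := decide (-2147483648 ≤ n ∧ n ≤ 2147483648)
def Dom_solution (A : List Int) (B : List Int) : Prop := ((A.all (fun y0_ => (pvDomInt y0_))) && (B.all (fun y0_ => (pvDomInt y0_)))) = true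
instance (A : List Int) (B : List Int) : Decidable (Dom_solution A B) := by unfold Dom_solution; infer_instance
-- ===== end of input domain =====

-- B abandons A's greedy two-pointer matching: it merges both teams' numbers into one even/odd-key
-- sorted stream and computes the score as len(B) minus the maximum prefix surplus of B numbers over
-- strictly smaller A numbers (a Hall-type deficiency count) — same O(n log n) cost, no pairing at all.
-- Both Pythons sort their list arguments in place (same mutation side effect); the claim is about the return value.

-- ===== PORT A =====
-- A's while-loop: state (i, j, answer); each iteration increments j, so (length - j) decreases.
def pvLoopA (a b : List Int) (length : Int) (i j answer : Int) : Int :=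
  if i < length ∧ j < length then
    match PySem.List.pyGet? a i, PySem.List.pyGet? b j with
    | some x, some y =>
        if x < y then pvLoopA a b length (i + 1) (j + 1) (answer + 1)
        else pvLoopA a b length i (j + 1) answer
    | _, _ => answer   -- Python raises IndexError here; Pre_solution excludes these inputs
  else answer
termination_by (length - j).toNat
decreasing_by all_goals omega

def solution (A : List Int) (B : List Int) : Int :=
  let a := PySem.List.sorted A (fun x => x)
  let b := PySem.List.sorted B (fun x => x)
  pvLoopA a b (a.length : Int) 0 0 0

-- ===== PORT B =====
-- bs = B[:n] is ported with PySem.List.slice (exact Python slice semantics); the for-loop over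
-- events is a foldl with state (diff, worst).
def solution_alt (A : List Int) (B : List Int) : Int :=
  let a := PySem.List.sorted A (fun x => x)
  let b := PySem.List.sorted B (fun x => x)
  let n := (A.length : Int)   -- len(A); the in-place sort keeps the length
  let bs := PySem.List.slice b none (some n)   -- B[:n] after the sort
  let events := PySem.List.sorted ((bs.map (fun v => 2 * v)) ++ (a.map (fun v => 2 * v + 1))) (fun x => x)
  let st := events.foldl
    (fun (st : Int × Int) k =>
      let diff := st.1 + (if PySem.Int.mod k 2 = 0 then (1 : Int) else -1)
      (diff, if st.2 < diff then diff else st.2))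
    ((0 : Int), (0 : Int))
  (bs.length : Int) - st.2

-- ===== PRECONDITION & SPEC =====
-- Exactly the inputs on which the Python A returns: both pointers are bounded by len(A), so when
-- len(B) < len(A) the loop always reaches j = len(B) with the guard still true and raises IndexError.
def Pre_solution (A : List Int) (B : List Int) : Prop := A.length ≤ B.length
instance (A : List Int) (B : List Int) : Decidable (Pre_solution A B) := by unfold Pre_solution; infer_instance
def pvWitness_solution : List Int × List Int := ([1, 3, 2], [2, 5, 1])

def Spec_solution (A : List Int) (B : List Int) (out : Int) : Prop := out = solution_alt A B
instance (A : List Int) (B : List Int) (out : Int) : Decidable (Spec_solution A B out) := by unfold Spec_solution; infer_instance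

-- ===== CLAIM (what is proved, stated in full; the proofs are below) =====
def Claim_equal_solution : Prop := ∀ (A : List Int) (B : List Int), Dom_solution A B → Pre_solution A B → Spec_solution A B (solution A B)

-- ===== LEMMAS AND PROOFS =====

-- functional form of A's forward greedy on the two sorted (ascending) lists
def pvF : List Int → List Int → Int
  | _, [] => 0
  | [], _ :: _ => 0
  | x :: a', y :: b' => if x < y then 1 + pvF a' b' else pvF (x :: a') b'
termination_by _a b => b.length
decreasing_by all_goals simp

theorem pvF_nil_left (l : List Int) : pvF [] l = 0 := by cases l <;> simp [pvF]

theorem pvF_nil_right (l : List Int) : pvF l [] = 0 := by cases l <;> simp [pvF]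

theorem pvF_le_length (b : List Int) : ∀ a : List Int, pvF a b ≤ (b.length : Int) := by
  induction b with
  | nil => intro a; rw [pvF_nil_right]; simp
  | cons y b' ih =>
    intro a
    cases a with
    | nil => rw [pvF_nil_left]; simp; omega
    | cons x a' =>
      simp only [pvF]
      by_cases h : x < y
      · rw [if_pos h]; have := ih a'; simp [List.length_cons]; omega
      · rw [if_neg h]; have := ih (x :: a'); simp [List.length_cons]; omega

theorem pvF_nonneg (b : List Int) : ∀ a : List Int, 0 ≤ pvF a b := by
  induction b with
  | nil => intro a; rw [pvF_nil_right]
  | cons y b' ih =>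
    intro a
    cases a with
    | nil => rw [pvF_nil_left]
    | cons x a' =>
      simp only [pvF]
      by_cases h : x < y
      · rw [if_pos h]; have := ih a'; omega
      · rw [if_neg h]; exact ih (x :: a')

theorem pvDrop_cons_of_pyGet? (a : List Int) (i : Int) (x : Int) (h0 : 0 ≤ i)
    (h : PySem.List.pyGet? a i = some x) : a.drop i.toNat = x :: a.drop (i.toNat + 1) := by
  rcases lt_or_ge i (a.length : Int) with hlt | hge
  · rw [PySem.List.pyGet?_eq_some_getElem a h0 hlt] at h
    rw [List.drop_eq_getElem_cons (by omega)]
    simp_all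
  · rw [(PySem.List.pyGet?_eq_none_iff a i).2 (by unfold PySem.Raise.InRange; omega)] at h
    cases h

-- A's index loop computes pvF of the still-unprocessed suffixes; only B[0:len(A)] is ever read.
theorem pvLoopA_eq_pvF (a b : List Int) (hlen : a.length ≤ b.length) :
    ∀ (n : Nat) (i j ans : Int), 0 ≤ i → 0 ≤ j → ((a.length : Int) - j).toNat ≤ n →
      pvLoopA a b (a.length : Int) i j ans
        = ans + pvF (a.drop i.toNat) ((b.take a.length).drop j.toNat) := by
  intro n
  induction n with
  | zero =>
    intro i j ans hi hj hn
    rw [pvLoopA]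
    rw [if_neg (by omega)]
    have hb : (b.take a.length).drop j.toNat = [] := List.drop_eq_nil_of_le (by simp; omega)
    rw [hb, pvF_nil_right]
    omega
  | succ n ih =>
    intro i j ans hi hj hn
    rw [pvLoopA]
    by_cases h : i < (a.length : Int) ∧ j < (a.length : Int)
    · rw [if_pos h]
      have hia : PySem.List.pyGet? a i = some a[i.toNat] :=
        PySem.List.pyGet?_eq_some_getElem a hi (by omega)
      have hjb : PySem.List.pyGet? b j = some b[j.toNat] :=
        PySem.List.pyGet?_eq_some_getElem b hj (by omega)
      have hda := pvDrop_cons_of_pyGet? a i _ hi hia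
      have hdb : (b.take a.length).drop j.toNat
          = b[j.toNat] :: (b.take a.length).drop (j.toNat + 1) := by
        rw [List.drop_eq_getElem_cons (by simp; omega)]
        congr 1
        simp
      rw [hia, hjb]
      simp only []
      rw [hda, hdb]
      by_cases hxy : a[i.toNat] < b[j.toNat]
      · rw [if_pos hxy]
        rw [ih (i + 1) (j + 1) (ans + 1) (by omega) (by omega) (by omega)]
        have e1 : (i + 1).toNat = i.toNat + 1 := by omega
        have e2 : (j + 1).toNat = j.toNat + 1 := by omega
        rw [e1, e2]
        simp only [pvF, if_pos hxy]
        omega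
      · rw [if_neg hxy]
        rw [ih i (j + 1) ans hi (by omega) (by omega)]
        have e2 : (j + 1).toNat = j.toNat + 1 := by omega
        rw [e2, hda]
        simp only [pvF, if_neg hxy]
    · rw [if_neg h]
      by_cases hi2 : i < (a.length : Int)
      · have hb : (b.take a.length).drop j.toNat = [] := List.drop_eq_nil_of_le (by simp; omega)
        rw [hb, pvF_nil_right]; omega
      · have ha : a.drop i.toNat = [] := List.drop_eq_nil_of_le (by omega)
        rw [ha, pvF_nil_left]; omega

-- ---- B side: the key stream and its max-prefix-surplus statistic ----

-- parity of the encoded keys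
theorem pvMod_even (v : Int) : PySem.Int.mod (2 * v) 2 = 0 := by
  rw [PySem.Int.mod_eq_emod_of_pos (by omega)]; omega

theorem pvMod_odd (v : Int) : PySem.Int.mod (2 * v + 1) 2 = 1 := by
  rw [PySem.Int.mod_eq_emod_of_pos (by omega)]; omega

def pvDelta (k : Int) : Int := if PySem.Int.mod k 2 = 0 then 1 else -1

-- max over all prefixes (including the empty one) of the running sum of pvDelta
def pvW : List Int → Int
  | [] => 0
  | k :: t => max 0 (pvDelta k + pvW t)

theorem pvW_nonneg (l : List Int) : 0 ≤ pvW l := by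
  cases l with
  | nil => exact le_refl 0
  | cons k t => exact le_max_left 0 _

-- B's (diff, worst) scan computes pvW
theorem pvScan_eq_pvW (l : List Int) :
    ∀ d w : Int, d ≤ w →
      (l.foldl
        (fun (st : Int × Int) k =>
          let diff := st.1 + (if PySem.Int.mod k 2 = 0 then (1 : Int) else -1)
          (diff, if st.2 < diff then diff else st.2))
        (d, w)).2 = max w (d + pvW l) := by
  induction l with
  | nil => intro d w hdw; simp [pvW]; omega
  | cons k t ih =>
    intro d w hdw
    simp only [List.foldl_cons]
    have hW := pvW_nonneg t
    have hd : pvDelta k = if PySem.Int.mod k 2 = 0 then (1 : Int) else -1 := rfl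
    rw [ih (d + (if PySem.Int.mod k 2 = 0 then (1 : Int) else -1))
          (if w < d + (if PySem.Int.mod k 2 = 0 then (1 : Int) else -1)
           then d + (if PySem.Int.mod k 2 = 0 then (1 : Int) else -1) else w)
          (by split <;> omega)]
    show _ = max w (d + pvW (k :: t))
    rw [pvW, ← hd]
    rcases le_or_gt (pvDelta k) 0 with h0 | h0 <;> · rw [hd] at *; split_ifs at * <;> omega

-- the stack-greedy failure count with c pending smaller A-numbers; used to tie pvW to pvF
def pvFail : Int → List Int → Int
  | _, [] => 0
  | c, k :: t =>
      if PySem.Int.mod k 2 = 0 then (if 0 < c then pvFail (c - 1) t else 1 + pvFail c t)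
      else pvFail (c + 1) t

theorem pvFail_eq_pvW (l : List Int) : ∀ c : Int, 0 ≤ c → pvFail c l = max 0 (pvW l - c) := by
  induction l with
  | nil => intro c hc; simp [pvFail, pvW]; omega
  | cons k t ih =>
    intro c hc
    have hW := pvW_nonneg t
    rw [pvFail, pvW]
    unfold pvDelta
    by_cases hk : PySem.Int.mod k 2 = 0
    · rw [if_pos hk, if_pos hk]
      by_cases hc0 : 0 < c
      · rw [if_pos hc0, ih (c - 1) (by omega)]; omega
      · rw [if_neg hc0, ih c hc]; omega
    · rw [if_neg hk, if_neg hk, ih (c + 1) (by omega)]; omega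

-- the merged even/odd key stream of the two sorted lists (B-keys even, A-keys odd)
def pvMergeE (a b : List Int) : List Int :=
  (b.map (fun v => 2 * v)).merge (a.map (fun v => 2 * v + 1)) (fun p q => p ≤ q)

theorem pvFail_odds (a : List Int) : ∀ c : Int, pvFail c (a.map (fun v => 2 * v + 1)) = 0 := by
  induction a with
  | nil => intro c; rfl
  | cons x a' ih =>
    intro c
    simp only [List.map_cons, pvFail, pvMod_odd]
    rw [if_neg (by simp), ih]

theorem pvFail_evens (b : List Int) :
    ∀ c : Int, 0 ≤ c → pvFail c (b.map (fun v => 2 * v)) = max 0 ((b.length : Int) - c) := by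
  induction b with
  | nil => intro c hc; simp [pvFail]; omega
  | cons y b' ih =>
    intro c hc
    simp only [List.map_cons, pvFail, pvMod_even, if_pos]
    by_cases hc0 : 0 < c
    · rw [if_pos hc0, ih (c - 1) (by omega)]; simp [List.length_cons]; omega
    · rw [if_neg hc0, ih c hc]
      have : (0 : Int) ≤ (b'.length : Int) := by positivity
      simp [List.length_cons]; omega

-- inserting a new smallest B-number y either leaves the greedy count unchanged, or raises it
-- by one — and in the latter case the rest of B was already fully matched
theorem pvF_cons_smallest (a : List Int) :
    ∀ (y : Int) (b : List Int), (y :: b).Pairwise (fun p q => p ≤ q) →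
      pvF a (y :: b) = pvF a b ∨
      (pvF a (y :: b) = pvF a b + 1 ∧ pvF a b = (b.length : Int)) := by
  induction a with
  | nil => intro y b _; left; rw [pvF_nil_left, pvF_nil_left]
  | cons x a' ih =>
    intro y b hb
    by_cases hxy : x < y
    · cases b with
      | nil =>
        right
        constructor
        · show pvF (x :: a') [y] = pvF (x :: a') [] + 1
          simp only [pvF, if_pos hxy]
          simp
        · rw [pvF_nil_right]; rfl
      | cons z b' =>
        have hyz : y ≤ z := (List.pairwise_cons.1 hb).1 z (by simp)
        have hxz : x < z := by omega
        have hnew : pvF (x :: a') (y :: z :: b') = 1 + pvF a' (z :: b') := by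
          simp only [pvF, if_pos hxy]
        have hold : pvF (x :: a') (z :: b') = 1 + pvF a' b' := by
          simp only [pvF, if_pos hxz]
        rcases ih z b' (List.pairwise_cons.1 hb).2 with h | ⟨h1, h2⟩
        · left; rw [hnew, hold, h]
        · right
          constructor
          · rw [hnew, hold, h1]; omega
          · rw [hold, h2]; simp [List.length_cons]; omega
    · left
      show pvF (x :: a') (y :: b) = pvF (x :: a') b
      simp only [pvF, if_neg hxy]

-- main invariant: over the merged key stream, the stack-greedy failure count with c credits
-- equals the shortfall of the two-pointer greedy plus c, clamped at zero
theorem pvFail_mergeE (n : Nat) :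
    ∀ (a b : List Int), a.length + b.length ≤ n →
      a.Pairwise (fun p q => p ≤ q) → b.Pairwise (fun p q => p ≤ q) →
      ∀ c : Int, 0 ≤ c →
        pvFail c (pvMergeE a b) = max 0 ((b.length : Int) - c - pvF a b) := by
  induction n with
  | zero =>
    intro a b hn _ _ c hc
    have ha : a = [] := by cases a <;> simp_all
    have hb : b = [] := by cases b <;> simp_all
    subst ha; subst hb
    simp [pvMergeE, pvF_nil_left, pvFail]
    omega
  | succ n ih =>
    intro a b hn hpa hpb c hc
    cases b with
    | nil =>
      rw [show pvMergeE a [] = a.map (fun v => 2 * v + 1) by simp [pvMergeE]]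
      rw [pvFail_odds, pvF_nil_right]
      simp; omega
    | cons y b' =>
      cases a with
      | nil =>
        rw [show pvMergeE [] (y :: b') = (y :: b').map (fun v => 2 * v) by simp [pvMergeE]]
        rw [pvFail_evens _ c hc, pvF_nil_left]
        omega
      | cons x a' =>
        by_cases hyx : y ≤ x
        · have hmerge : pvMergeE (x :: a') (y :: b') = 2 * y :: pvMergeE (x :: a') b' := by
            simp only [pvMergeE, List.map_cons]
            rw [List.merge]
            rw [if_pos (by simp; omega)]
          have hpvF : pvF (x :: a') (y :: b') = pvF (x :: a') b' := by
            simp only [pvF, if_neg (by omega : ¬ x < y)]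
          rw [hmerge, pvFail, if_pos (pvMod_even y)]
          by_cases hc0 : 0 < c
          · rw [if_pos hc0,
              ih (x :: a') b' (by simp at hn ⊢; omega) hpa (List.pairwise_cons.1 hpb).2 (c - 1) (by omega),
              hpvF]
            simp [List.length_cons]; omega
          · rw [if_neg hc0,
              ih (x :: a') b' (by simp at hn ⊢; omega) hpa (List.pairwise_cons.1 hpb).2 c hc,
              hpvF]
            have hle := pvF_le_length b' (x :: a')
            have hnn := pvF_nonneg b' (x :: a')
            simp [List.length_cons]; omega
        · have hxy : x < y := by omega
          have hmerge : pvMergeE (x :: a') (y :: b') = (2 * x + 1) :: pvMergeE a' (y :: b') := by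
            simp only [pvMergeE, List.map_cons]
            rw [List.merge]
            rw [if_neg (by simp; omega)]
          have hpvF : pvF (x :: a') (y :: b') = 1 + pvF a' b' := by
            simp only [pvF, if_pos hxy]
          rw [hmerge, pvFail, if_neg (by rw [pvMod_odd]; omega)]
          rw [ih a' (y :: b') (by simp at hn ⊢; omega) (List.pairwise_cons.1 hpa).2 hpb (c + 1) (by omega)]
          rcases pvF_cons_smallest a' y b' hpb with h | ⟨h1, h2⟩
          · rw [h, hpvF]; simp [List.length_cons]; omega
          · rw [h1, h2, hpvF, h2]; simp [List.length_cons]; omega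

-- the sorted key stream IS the merge of the two mapped sorted lists
theorem pvEvents_eq_mergeE (a b : List Int)
    (hpa : a.Pairwise (fun p q => p ≤ q)) (hpb : b.Pairwise (fun p q => p ≤ q)) :
    PySem.List.sorted ((b.map (fun v => 2 * v)) ++ (a.map (fun v => 2 * v + 1))) (fun x => x)
      = pvMergeE a b := by
  apply List.Perm.eq_of_pairwise' (r := (· ≤ · : Int → Int → Prop))
  · have := PySem.List.sorted_pairwise ((b.map (fun v => 2 * v)) ++ (a.map (fun v => 2 * v + 1))) (fun x => x)
    simpa using this
  · show (pvMergeE a b).Pairwise (· ≤ ·)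
    unfold pvMergeE
    apply List.Pairwise.merge (r := (· ≤ · : Int → Int → Prop))
    · rw [List.pairwise_map]
      exact hpb.imp (by intro p q h; omega)
    · rw [List.pairwise_map]
      exact hpa.imp (by intro p q h; omega)
  · exact (PySem.List.sorted_perm _ _ false).trans (List.merge_perm_append _).symm

-- ===== VERDICT (by name: the statement is the Claim_ definition above) =====
theorem solution_spec : Claim_equal_solution := by
  intro A B _ hpre
  unfold Spec_solution solution solution_alt
  simp only []
  generalize hA : PySem.List.sorted A (fun x => x) = a
  generalize hB : PySem.List.sorted B (fun x => x) = b
  have hlenA : a.length = A.length := by rw [← hA, PySem.List.length_sorted]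
  have hlenB : b.length = B.length := by rw [← hB, PySem.List.length_sorted]
  have hslice : PySem.List.slice b none (some (A.length : Int)) = b.take A.length :=
    PySem.List.slice_to_natCast b A.length
  rw [hslice]
  have hlen : a.length ≤ b.length := by
    unfold Pre_solution at hpre; omega
  have hbs : b.take A.length = b.take a.length := by rw [hlenA]
  rw [hbs]
  have hlenbs : (b.take a.length).length = a.length := by simp; omega
  have hpa : a.Pairwise (fun p q => p ≤ q) := by
    rw [← hA]; exact PySem.List.sorted_pairwise A (fun x => x)
  have hpb : b.Pairwise (fun p q => p ≤ q) := by
    rw [← hB]; exact PySem.List.sorted_pairwise B (fun x => x)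
  have hpbs : (b.take a.length).Pairwise (fun p q => p ≤ q) :=
    hpb.sublist (List.take_sublist _ _)
  -- A's side
  have h1 : pvLoopA a b (a.length : Int) 0 0 0 = pvF a (b.take a.length) := by
    have := pvLoopA_eq_pvF a b hlen ((a.length : Int) - 0).toNat 0 0 0 le_rfl le_rfl le_rfl
    simpa using this
  -- B's side
  rw [pvEvents_eq_mergeE a (b.take a.length) hpa hpbs]
  have h2 := pvScan_eq_pvW (pvMergeE a (b.take a.length)) 0 0 le_rfl
  rw [h2]
  have h3 : pvW (pvMergeE a (b.take a.length))
      = ((b.take a.length).length : Int) - pvF a (b.take a.length) := by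
    have hf := pvFail_mergeE (a.length + (b.take a.length).length) a (b.take a.length)
      le_rfl hpa hpbs 0 le_rfl
    rw [pvFail_eq_pvW _ 0 le_rfl] at hf
    have hW := pvW_nonneg (pvMergeE a (b.take a.length))
    have hle := pvF_le_length (b.take a.length) a
    omega
  rw [h1, h3]
  have hnn := pvF_nonneg (b.take a.length) a
  have hle := pvF_le_length (b.take a.length) a
  omega
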